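-- pv_equiv track=rewrite | github.com/fatcrapinmybutt/fredprime-legal-system | tools/adversarial_signal_suite/adversarial_signal_suite.py | bucket_for_ext
-- ===== SOURCE A (Python) =====
-- from typing import Any, Dict, Iterable, List, Optional, Tuple
--
-- BUCKET_RULES: Dict[str, Any] = {
--     "version": "bucket_rules.v1",
--     "max_buckets": 15,
--     "buckets": [
--         {"bucket": "B01_TEXT", "ext": [".txt", ".md", ".log"]},
--         {"bucket": "B02_PDF", "ext": [".pdf"]},
--         {"bucket": "B03_DOCX", "ext": [".docx"]},
--         {"bucket": "B04_RTF", "ext": [".rtf"]},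
--         {"bucket": "B05_HTML", "ext": [".html", ".htm"]},
--         {"bucket": "B06_JSON", "ext": [".json", ".jsonl"]},
--         {"bucket": "B07_CSV", "ext": [".csv", ".tsv"]},
--         {"bucket": "B08_IMAGES", "ext": [".png", ".jpg", ".jpeg", ".webp", ".tif", ".tiff", ".bmp", ".gif"]},
--         {"bucket": "B09_AUDIO", "ext": [".mp3", ".wav", ".m4a", ".aac", ".flac", ".ogg"]},
--         {"bucket": "B10_VIDEO", "ext": [".mp4", ".mov", ".mkv", ".avi", ".webm"]},
--         {"bucket": "B11_ARCHIVES", "ext": [".zip", ".7z", ".rar", ".tar", ".gz", ".bz2", ".xz"]},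
--         {
--             "bucket": "B12_CODE",
--             "ext": [
--                 ".py",
--                 ".ps1",
--                 ".js",
--                 ".ts",
--                 ".tsx",
--                 ".java",
--                 ".cs",
--                 ".cpp",
--                 ".c",
--                 ".h",
--                 ".rs",
--                 ".go",
--                 ".sql",
--                 ".yml",
--                 ".yaml",
--                 ".toml",
--                 ".ini",
--                 ".cfg",
--                 ".bat",
--                 ".sh",
--             ],
--         },
--         {"bucket": "B13_OFFICE_MISC", "ext": [".ppt", ".pptx", ".xls", ".xlsx"]},
--         {"bucket": "B14_EMAIL", "ext": [".eml", ".msg"]},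
--         {"bucket": "B15_OTHER", "ext": ["*"]},
--     ],
-- }
--
-- def bucket_for_ext(ext: str) -> str:
--     ext = ext.lower()
--     for bucket in BUCKET_RULES["buckets"]:
--         if "*" in bucket["ext"]:
--             continue
--         if ext in bucket["ext"]:
--             return bucket["bucket"]
--     return "B15_OTHER"
-- ===== SOURCE B (Python) =====
-- # Flat bare-extension -> bucket table, precomputed once; lookup strips the leading dot.
-- _EXT_BUCKET = {
--     "txt": "B01_TEXT",
--     "md": "B01_TEXT",
--     "log": "B01_TEXT",
--     "pdf": "B02_PDF",
--     "docx": "B03_DOCX",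
--     "rtf": "B04_RTF",
--     "html": "B05_HTML",
--     "htm": "B05_HTML",
--     "json": "B06_JSON",
--     "jsonl": "B06_JSON",
--     "csv": "B07_CSV",
--     "tsv": "B07_CSV",
--     "png": "B08_IMAGES",
--     "jpg": "B08_IMAGES",
--     "jpeg": "B08_IMAGES",
--     "webp": "B08_IMAGES",
--     "tif": "B08_IMAGES",
--     "tiff": "B08_IMAGES",
--     "bmp": "B08_IMAGES",
--     "gif": "B08_IMAGES",
--     "mp3": "B09_AUDIO",
--     "wav": "B09_AUDIO",
--     "m4a": "B09_AUDIO",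
--     "aac": "B09_AUDIO",
--     "flac": "B09_AUDIO",
--     "ogg": "B09_AUDIO",
--     "mp4": "B10_VIDEO",
--     "mov": "B10_VIDEO",
--     "mkv": "B10_VIDEO",
--     "avi": "B10_VIDEO",
--     "webm": "B10_VIDEO",
--     "zip": "B11_ARCHIVES",
--     "7z": "B11_ARCHIVES",
--     "rar": "B11_ARCHIVES",
--     "tar": "B11_ARCHIVES",
--     "gz": "B11_ARCHIVES",
--     "bz2": "B11_ARCHIVES",
--     "xz": "B11_ARCHIVES",
--     "py": "B12_CODE",
--     "ps1": "B12_CODE",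
--     "js": "B12_CODE",
--     "ts": "B12_CODE",
--     "tsx": "B12_CODE",
--     "java": "B12_CODE",
--     "cs": "B12_CODE",
--     "cpp": "B12_CODE",
--     "c": "B12_CODE",
--     "h": "B12_CODE",
--     "rs": "B12_CODE",
--     "go": "B12_CODE",
--     "sql": "B12_CODE",
--     "yml": "B12_CODE",
--     "yaml": "B12_CODE",
--     "toml": "B12_CODE",
--     "ini": "B12_CODE",
--     "cfg": "B12_CODE",
--     "bat": "B12_CODE",
--     "sh": "B12_CODE",
--     "ppt": "B13_OFFICE_MISC",
--     "pptx": "B13_OFFICE_MISC",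
--     "xls": "B13_OFFICE_MISC",
--     "xlsx": "B13_OFFICE_MISC",
--     "eml": "B14_EMAIL",
--     "msg": "B14_EMAIL",
-- }
--
-- def bucket_for_ext(ext: str) -> str:
--     e = ext.lower()
--     if e.startswith("."):
--         return _EXT_BUCKET.get(e[1:], "B15_OTHER")
--     return "B15_OTHER"
-- ===== Notes on version B (the rewrite author's own statement) =====
-- stated objective: idiomatic
-- what changed: Replaced the per-call loop over the nested bucket table (wildcard skip plus a list membership test per bucket) by a single precomputed flat bare-extension->bucket dict: B lowercases, strips the leading dot, and does one .get() with the 'B15_OTHER' default.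
import Mathlib
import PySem

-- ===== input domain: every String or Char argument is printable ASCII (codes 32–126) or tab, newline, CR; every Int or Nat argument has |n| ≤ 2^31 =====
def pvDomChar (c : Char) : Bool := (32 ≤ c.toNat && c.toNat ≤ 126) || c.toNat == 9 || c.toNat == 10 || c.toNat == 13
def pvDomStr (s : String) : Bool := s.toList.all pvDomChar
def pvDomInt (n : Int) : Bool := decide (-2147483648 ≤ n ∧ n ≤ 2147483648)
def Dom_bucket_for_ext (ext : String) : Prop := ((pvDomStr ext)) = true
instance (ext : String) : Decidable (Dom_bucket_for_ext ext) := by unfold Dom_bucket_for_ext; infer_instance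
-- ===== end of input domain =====

-- B replaces A's per-call scan over the nested bucket table by one precomputed flat
-- bare-extension -> bucket dict consulted after stripping the leading dot (idiomatic).

-- ===== PORT A =====
-- BUCKET_RULES["buckets"]: bucket name paired with its extension list, in order.
def pvBucketsA : List (String × List String) :=
  [   ("B01_TEXT", [".txt", ".md", ".log"]),
   ("B02_PDF", [".pdf"]),
   ("B03_DOCX", [".docx"]),
   ("B04_RTF", [".rtf"]),
   ("B05_HTML", [".html", ".htm"]),
   ("B06_JSON", [".json", ".jsonl"]),
   ("B07_CSV", [".csv", ".tsv"]),
   ("B08_IMAGES", [".png", ".jpg", ".jpeg", ".webp", ".tif", ".tiff", ".bmp", ".gif"]),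
   ("B09_AUDIO", [".mp3", ".wav", ".m4a", ".aac", ".flac", ".ogg"]),
   ("B10_VIDEO", [".mp4", ".mov", ".mkv", ".avi", ".webm"]),
   ("B11_ARCHIVES", [".zip", ".7z", ".rar", ".tar", ".gz", ".bz2", ".xz"]),
   ("B12_CODE", [".py", ".ps1", ".js", ".ts", ".tsx", ".java", ".cs", ".cpp", ".c", ".h", ".rs", ".go", ".sql", ".yml", ".yaml", ".toml", ".ini", ".cfg", ".bat", ".sh"]),
   ("B13_OFFICE_MISC", [".ppt", ".pptx", ".xls", ".xlsx"]),
   ("B14_EMAIL", [".eml", ".msg"]),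
   ("B15_OTHER", ["*"])]

-- the 'for bucket in BUCKET_RULES["buckets"]' loop with its early return
def pvLoopA : List (String × List String) → String → String
  | [], _ => "B15_OTHER"
  | (name, exts) :: rest, e =>
      if "*" ∈ exts then pvLoopA rest e
      else if e ∈ exts then name
      else pvLoopA rest e

def bucket_for_ext (ext : String) : String :=
  pvLoopA pvBucketsA (PySem.Str.lower ext)

-- ===== PORT B =====
-- _EXT_BUCKET: the flat bare-extension -> bucket dict literal of Source B (distinct keys,
-- insertion order; dict.get is first-match lookup on this association list).
def pvExtBucket : List (String × String) :=
  [   ("txt", "B01_TEXT"),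
   ("md", "B01_TEXT"),
   ("log", "B01_TEXT"),
   ("pdf", "B02_PDF"),
   ("docx", "B03_DOCX"),
   ("rtf", "B04_RTF"),
   ("html", "B05_HTML"),
   ("htm", "B05_HTML"),
   ("json", "B06_JSON"),
   ("jsonl", "B06_JSON"),
   ("csv", "B07_CSV"),
   ("tsv", "B07_CSV"),
   ("png", "B08_IMAGES"),
   ("jpg", "B08_IMAGES"),
   ("jpeg", "B08_IMAGES"),
   ("webp", "B08_IMAGES"),
   ("tif", "B08_IMAGES"),
   ("tiff", "B08_IMAGES"),
   ("bmp", "B08_IMAGES"),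
   ("gif", "B08_IMAGES"),
   ("mp3", "B09_AUDIO"),
   ("wav", "B09_AUDIO"),
   ("m4a", "B09_AUDIO"),
   ("aac", "B09_AUDIO"),
   ("flac", "B09_AUDIO"),
   ("ogg", "B09_AUDIO"),
   ("mp4", "B10_VIDEO"),
   ("mov", "B10_VIDEO"),
   ("mkv", "B10_VIDEO"),
   ("avi", "B10_VIDEO"),
   ("webm", "B10_VIDEO"),
   ("zip", "B11_ARCHIVES"),
   ("7z", "B11_ARCHIVES"),
   ("rar", "B11_ARCHIVES"),
   ("tar", "B11_ARCHIVES"),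
   ("gz", "B11_ARCHIVES"),
   ("bz2", "B11_ARCHIVES"),
   ("xz", "B11_ARCHIVES"),
   ("py", "B12_CODE"),
   ("ps1", "B12_CODE"),
   ("js", "B12_CODE"),
   ("ts", "B12_CODE"),
   ("tsx", "B12_CODE"),
   ("java", "B12_CODE"),
   ("cs", "B12_CODE"),
   ("cpp", "B12_CODE"),
   ("c", "B12_CODE"),
   ("h", "B12_CODE"),
   ("rs", "B12_CODE"),
   ("go", "B12_CODE"),
   ("sql", "B12_CODE"),
   ("yml", "B12_CODE"),
   ("yaml", "B12_CODE"),
   ("toml", "B12_CODE"),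
   ("ini", "B12_CODE"),
   ("cfg", "B12_CODE"),
   ("bat", "B12_CODE"),
   ("sh", "B12_CODE"),
   ("ppt", "B13_OFFICE_MISC"),
   ("pptx", "B13_OFFICE_MISC"),
   ("xls", "B13_OFFICE_MISC"),
   ("xlsx", "B13_OFFICE_MISC"),
   ("eml", "B14_EMAIL"),
   ("msg", "B14_EMAIL")]

-- dict.get(key, "B15_OTHER")
def pvDictGet : List (String × String) → String → String
  | [], _ => "B15_OTHER"
  | (k, v) :: rest, e => if e = k then v else pvDictGet rest e

def bucket_for_ext_alt (ext : String) : String :=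
  let e := PySem.Str.lower ext
  if PySem.Str.startswith e "." then
    pvDictGet pvExtBucket (PySem.Str.slice e (some 1) none)   -- e[1:]
  else "B15_OTHER"

-- ===== PRECONDITION & SPEC =====
def Spec_bucket_for_ext (ext : String) (out : String) : Prop := out = bucket_for_ext_alt ext
instance (ext : String) (out : String) : Decidable (Spec_bucket_for_ext ext out) := by unfold Spec_bucket_for_ext; infer_instance

-- ===== CLAIM (what is proved, stated in full; the proofs are below) =====
def Claim_equal_bucket_for_ext : Prop := ∀ (ext : String), Dom_bucket_for_ext ext → Spec_bucket_for_ext ext (bucket_for_ext ext)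

-- ===== LEMMAS AND PROOFS =====

-- A's nested table, flattened in loop order (proof-side helper)
def pvFlat (bs : List (String × List String)) : List (String × String) :=
  bs.flatMap (fun p => if "*" ∈ p.2 then [] else p.2.map (fun x => (x, p.1)))

-- looking a key up in the block of pairs contributed by one bucket
lemma pvDictGet_block (exts : List String) (name : String) (tail : List (String × String))
    (e : String) :
    pvDictGet (exts.map (fun x => (x, name)) ++ tail) e
      = if e ∈ exts then name else pvDictGet tail e := by
  induction exts with
  | nil => simp
  | cons x xs ih =>
      simp only [List.map_cons, List.cons_append, pvDictGet, List.mem_cons, ih]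
      by_cases h : e = x <;> simp [h]

-- A's loop over the bucket table equals first-match lookup in the flattened index
lemma pvLoop_eq_flat (bs : List (String × List String)) (e : String) :
    pvLoopA bs e = pvDictGet (pvFlat bs) e := by
  induction bs with
  | nil => rfl
  | cons b rest ih =>
      obtain ⟨name, exts⟩ := b
      by_cases hw : "*" ∈ exts
      · simp [pvLoopA, pvFlat, hw, ih]
      · simp only [pvLoopA, hw, if_false, pvFlat, List.flatMap_cons, pvDictGet_block]
        by_cases hm : e ∈ exts <;> simp [pvFlat, hm, ih]

-- A's flattened index is B's dict with a dot prefixed to every key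
lemma pvFlat_bucketsA :
    pvFlat pvBucketsA
      = pvExtBucket.map (fun p => (String.ofList ('.' :: p.1.toList), p.2)) := by
  decide

lemma string_eq_iff_toList (s t : String) : s = t ↔ s.toList = t.toList :=
  ⟨fun h => h ▸ rfl, String.toList_inj.mp⟩

-- a string not starting with '.' misses every dotted key
lemma pvDictGet_dot_none (l : List (String × String)) (e : String)
    (h : ∀ t, e.toList ≠ '.' :: t) :
    pvDictGet (l.map (fun p => (String.ofList ('.' :: p.1.toList), p.2))) e
      = "B15_OTHER" := by
  induction l with
  | nil => rfl
  | cons p r ih =>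
      simp only [List.map_cons, pvDictGet, ih]
      rw [if_neg]
      intro heq
      exact h p.1.toList (by simpa [string_eq_iff_toList] using heq)

-- a string '.'++rest looks up in the dotted dict exactly as rest in the bare dict
lemma pvDictGet_dot_cons (l : List (String × String)) (e t : String) (rest : List Char)
    (he : e.toList = '.' :: rest) (ht : t.toList = rest) :
    pvDictGet (l.map (fun p => (String.ofList ('.' :: p.1.toList), p.2))) e
      = pvDictGet l t := by
  induction l with
  | nil => rfl
  | cons p r ih =>
      obtain ⟨k, v⟩ := p
      simp only [List.map_cons, pvDictGet, ih]
      have hiff : (e = String.ofList ('.' :: k.toList)) ↔ (t = k) := by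
        rw [string_eq_iff_toList, string_eq_iff_toList, he, ht]
        simp
      by_cases hk : t = k
      · rw [if_pos (hiff.mpr hk), if_pos hk]
      · rw [if_neg (fun hc => hk (hiff.mp hc)), if_neg hk]

-- startswith(e, ".") holds exactly when e's characters are '.' followed by a tail
lemma startswith_dot_iff (s : String) :
    PySem.Str.startswith s "." = true ↔ ∃ t, s.toList = '.' :: t := by
  rw [PySem.Str.startswith_eq, PySem.Chars.startswith_iff]
  show ('.' :: ([] : List Char)) <+: s.toList ↔ _
  cases h : s.toList with
  | nil => simp
  | cons c cs => simp [List.cons_prefix_iff]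

-- ===== VERDICT (by name: the statement is the Claim_ definition above) =====
theorem bucket_for_ext_spec : Claim_equal_bucket_for_ext := by
  intro ext _
  unfold Spec_bucket_for_ext bucket_for_ext bucket_for_ext_alt
  rw [pvLoop_eq_flat, pvFlat_bucketsA]
  by_cases h : PySem.Str.startswith (PySem.Str.lower ext) "." = true
  · obtain ⟨rest, he⟩ := (startswith_dot_iff _).mp h
    simp only [h, if_true]
    refine pvDictGet_dot_cons _ _ _ rest he ?_
    rw [PySem.Str.toList_slice]
    simp [he, PySem.List.slice_from_one]
  · simp only [h, Bool.false_eq_true, if_false]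
    refine pvDictGet_dot_none _ _ (fun t ht => ?_)
    exact h ((startswith_dot_iff _).mpr ⟨t, ht⟩)
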